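-- pv_equiv track=rewrite | github.com/rishabh-22/Problem-Solving | order_widget.py | filled_orders
-- ===== SOURCE A (Python) =====
-- def filled_orders(order, k):
--     # Write your code here
--     w = k
--     total = 0
--     while len(order) > 0 and min(order) <= w:
--         o = min(order)
--         order.remove(o)
--         w -= o
--         total += 1
--     return total
-- ===== SOURCE B (Python) =====
-- def filled_orders(order, k):
--     # Sort ascending once and take orders greedily until the budget is exceeded.
--     # Note: does not mutate `order` (A empties it in place); return value is identical.
--     w = k
--     total = 0
--     for o in sorted(order):
--         if o > w:
--             break
--         w -= o
--         total += 1
--     return total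
-- ===== Notes on version B (the rewrite author's own statement) =====
-- stated objective: faster
-- what changed: Replaces the repeated min()+remove() scan per iteration with a single ascending sort followed by one linear greedy pass that breaks when the next cheapest order exceeds the remaining budget.
import Mathlib
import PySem

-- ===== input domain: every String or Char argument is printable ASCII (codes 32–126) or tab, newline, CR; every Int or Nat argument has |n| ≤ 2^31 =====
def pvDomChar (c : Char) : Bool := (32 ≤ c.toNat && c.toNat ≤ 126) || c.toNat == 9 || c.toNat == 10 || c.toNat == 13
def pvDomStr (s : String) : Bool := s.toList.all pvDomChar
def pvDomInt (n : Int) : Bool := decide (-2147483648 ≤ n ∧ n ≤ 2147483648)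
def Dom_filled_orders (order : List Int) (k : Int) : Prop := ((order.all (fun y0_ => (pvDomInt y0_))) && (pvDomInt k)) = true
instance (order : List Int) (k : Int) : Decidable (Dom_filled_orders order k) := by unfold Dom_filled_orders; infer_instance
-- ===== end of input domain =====

-- B sorts once and scans; A repeatedly scans for min and removes it.
-- A mutates `order` in place (empties the affordable prefix); the claim is about the return value only.

-- ===== PORT A =====
-- the while loop: while len(order) > 0 and min(order) <= w: remove min, pay it, count it
def filled_orders_loopA (order : List Int) (w : Int) (total : Int) : Int :=
  match h : PySem.List.min? order (fun x => x) with
  | none => total              -- len(order) == 0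
  | some o =>
    if o ≤ w then
      -- order.remove(o) removes the first occurrence of o (o ∈ order, so no ValueError)
      filled_orders_loopA (order.erase o) (w - o) (total + 1)
    else total
termination_by order.length
decreasing_by
  have := List.length_erase_of_mem (PySem.List.min?_mem h)
  have : order ≠ [] := by rintro rfl; exact absurd h (by simp [PySem.List.min?])
  have : 0 < order.length := List.length_pos_iff.mpr this
  omega

def filled_orders (order : List Int) (k : Int) : Int :=
  filled_orders_loopA order k 0

-- ===== PORT B =====
-- for o in sorted(order): if o > w: break; w -= o; total += 1
def filled_orders_loopB : List Int → Int → Int → Int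
  | [], _, total => total
  | o :: rest, w, total =>
    if o > w then total else filled_orders_loopB rest (w - o) (total + 1)

def filled_orders_alt (order : List Int) (k : Int) : Int :=
  filled_orders_loopB (PySem.List.sorted order (fun x => x) false) k 0

-- ===== PRECONDITION & SPEC =====
def Spec_filled_orders (order : List Int) (k : Int) (out : Int) : Prop := out = filled_orders_alt order k
instance (order : List Int) (k : Int) (out : Int) : Decidable (Spec_filled_orders order k out) := by unfold Spec_filled_orders; infer_instance

-- ===== CLAIM (what is proved, stated in full; the proofs are below) =====
def Claim_equal_filled_orders : Prop := ∀ (order : List Int) (k : Int), Dom_filled_orders order k → Spec_filled_orders order k (filled_orders order k)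

-- ===== LEMMAS AND PROOFS =====

-- pulling the minimum to the front: sorted(order) = min :: sorted(order with its first min removed)
theorem sorted_eq_min_cons (order : List Int) (m : Int)
    (h : PySem.List.min? order (fun x => x) = some m) :
    PySem.List.sorted order (fun x => x) false
      = m :: PySem.List.sorted (order.erase m) (fun x => x) false := by
  have hm : m ∈ order := PySem.List.min?_mem h
  refine PySem.List.sorted_id_eq_of_perm_of_pairwise order (m :: PySem.List.sorted (order.erase m) (fun x => x) false) ?_ ?_
  · exact ((PySem.List.sorted_perm _ _ _).cons m).trans (List.perm_cons_erase hm).symm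
  · refine List.pairwise_cons.mpr ⟨?_, ?_⟩
    · intro y hy
      have : y ∈ order.erase m := (PySem.List.mem_sorted _ _ _ _).1 hy
      exact PySem.List.min?_isMin h y (List.mem_of_mem_erase this)
    · exact PySem.List.sorted_pairwise _ _

theorem loopA_eq_loopB (n : Nat) (order : List Int) (w total : Int)
    (hn : order.length ≤ n) :
    filled_orders_loopA order w total
      = filled_orders_loopB (PySem.List.sorted order (fun x => x) false) w total := by
  induction n generalizing order w total with
  | zero =>
    have : order = [] := List.eq_nil_of_length_eq_zero (Nat.le_zero.mp hn)
    subst this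
    simp [filled_orders_loopA, filled_orders_loopB, PySem.List.min?, PySem.List.sorted]
  | succ n ih =>
    rw [filled_orders_loopA]
    cases h : PySem.List.min? order (fun x => x) with
    | none =>
      have : order = [] := (PySem.List.min?_eq_none_iff order (fun x => x)).1 h
      subst this
      simp [filled_orders_loopB, PySem.List.sorted]
    | some m =>
      rw [sorted_eq_min_cons order m h]
      have hm : m ∈ order := PySem.List.min?_mem h
      have hlen : (order.erase m).length ≤ n := by
        have := List.length_erase_of_mem hm
        have : 0 < order.length := List.length_pos_iff.mpr (List.ne_nil_of_mem hm)
        omega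
      by_cases hle : m ≤ w
      · simp only [hle, if_pos, filled_orders_loopB, if_neg (by omega : ¬ m > w)]
        exact ih (order.erase m) (w - m) (total + 1) hlen
      · simp [hle, filled_orders_loopB, show m > w by omega]

-- ===== VERDICT (by name: the statement is the Claim_ definition above) =====
theorem filled_orders_spec : Claim_equal_filled_orders := by
  intro order k _
  unfold Spec_filled_orders filled_orders filled_orders_alt
  exact loopA_eq_loopB order.length order k 0 le_rfl
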